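-- pv_equiv track=rewrite | github.com/ianjones02/BINF_6112_Final | src/msaligner/alignment (1).py | add_gaps_to_match
-- ===== SOURCE A (Python) =====
-- def add_gaps_to_match(seq: str, target: str) -> str:
--     """
--     Add gaps to sequence to match target alignment length.
--
--     Args:
--         seq: Original sequence
--         target: Target sequence with gaps
--
--     Returns:
--         Sequence with added gaps
--     """
--     result = []
--     seq_pos = 0
--
--     for char in target:
--         if char == '-':
--             result.append('-')
--         else:
--             if seq_pos < len(seq):
--                 result.append(seq[seq_pos])
--                 seq_pos += 1
--             else:
--                 result.append('-')
--
--     # Add remaining sequence if any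
--     while seq_pos < len(seq):
--         result.append(seq[seq_pos])
--         seq_pos += 1
--
--     return ''.join(result)
-- ===== SOURCE B (Python) =====
-- def add_gaps_to_match(seq: str, target: str) -> str:
--     """Seq-driven overlay: per seq char, flush leading target gaps, consume one
--     target position if any; finally pad remaining target positions with '-'."""
--     out = []
--     ti = 0
--     n = len(target)
--     for ch in seq:
--         while ti < n and target[ti] == '-':
--             out.append('-')
--             ti += 1
--         if ti < n:
--             ti += 1
--         out.append(ch)
--     out.append('-' * (n - ti))
--     return ''.join(out)
-- ===== Notes on version B (the rewrite author's own statement) =====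
-- stated objective: alternative
-- what changed: Inverted the traversal: instead of A's target-driven loop with a seq index, B loops over seq consuming a shrinking target remainder (emitting '-' for leading target gaps each step) and pads the leftover target with '-' at the end.
import Mathlib
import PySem

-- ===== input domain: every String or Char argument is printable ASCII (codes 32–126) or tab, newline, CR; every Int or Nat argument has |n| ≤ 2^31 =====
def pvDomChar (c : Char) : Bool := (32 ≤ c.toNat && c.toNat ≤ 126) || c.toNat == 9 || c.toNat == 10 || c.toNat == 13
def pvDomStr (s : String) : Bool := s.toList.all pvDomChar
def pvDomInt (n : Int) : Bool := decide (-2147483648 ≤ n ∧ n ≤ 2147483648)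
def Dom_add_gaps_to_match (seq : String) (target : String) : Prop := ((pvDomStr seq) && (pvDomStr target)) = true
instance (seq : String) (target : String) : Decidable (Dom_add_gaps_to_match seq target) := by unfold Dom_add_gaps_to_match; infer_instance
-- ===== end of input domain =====

set_option maxRecDepth 4000


-- B inverts the traversal (seq-driven with a shrinking target remainder) instead of A's
-- target-driven loop with a seq index; same cost, alternative decomposition.

-- ===== PORT A =====
-- the trailing 'while seq_pos < len(seq)' loop of A
def pvTailA (s : List Char) (pos : Nat) (out : List Char) : List Char :=
  if h : pos < s.length then pvTailA s (pos + 1) (out ++ [s[pos]]) else out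
  termination_by s.length - pos

def add_gaps_to_match (seq : String) (target : String) : String :=
  let s := seq.toList
  let st := target.toList.foldl
    (fun (acc : List Char × Nat) c =>
      if c = '-' then (acc.1 ++ ['-'], acc.2)
      else if acc.2 < s.length then (acc.1 ++ [s.getD acc.2 ' '], acc.2 + 1)
      else (acc.1 ++ ['-'], acc.2))
    ([], 0)
  String.mk (pvTailA s st.2 st.1)

-- ===== PORT B =====
-- 'while ti < n and target[ti] == '-'': emit '-' for each leading gap at index ti
def pvSkipGaps (t : List Char) (ti : Nat) (out : List Char) : Nat × List Char :=
  if h : ti < t.length then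
    if t[ti] = '-' then pvSkipGaps t (ti + 1) (out ++ ['-']) else (ti, out)
  else (ti, out)
  termination_by t.length - ti

-- the 'for ch in seq' loop of B
def pvAltLoop (s t : List Char) (ti : Nat) (out : List Char) : List Char :=
  match s with
  | [] => out ++ List.replicate (t.length - ti) '-'
  | ch :: s' =>
    let p := pvSkipGaps t ti out
    let ti' := if p.1 < t.length then p.1 + 1 else p.1
    pvAltLoop s' t ti' (p.2 ++ [ch])

def add_gaps_to_match_alt (seq : String) (target : String) : String :=
  String.mk (pvAltLoop seq.toList target.toList 0 [])

-- ===== PRECONDITION & SPEC =====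
def Spec_add_gaps_to_match (seq : String) (target : String) (out : String) : Prop := out = add_gaps_to_match_alt seq target
instance (seq : String) (target : String) (out : String) : Decidable (Spec_add_gaps_to_match seq target out) := by unfold Spec_add_gaps_to_match; infer_instance

-- ===== CLAIM (what is proved, stated in full; the proofs are below) =====
def Claim_equal_add_gaps_to_match : Prop := ∀ (seq : String) (target : String), Dom_add_gaps_to_match seq target → Spec_add_gaps_to_match seq target (add_gaps_to_match seq target)

-- ===== LEMMAS AND PROOFS =====

-- common specification: overlay the seq remainder onto the target pattern
def pvOv : List Char → List Char → List Char
  | [], srem => srem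
  | c :: t, srem =>
    if c = '-' then '-' :: pvOv t srem
    else match srem with
      | [] => '-' :: pvOv t []
      | x :: sr => x :: pvOv t sr

theorem pvTailA_eq (s : List Char) (pos : Nat) (out : List Char) :
    pvTailA s pos out = out ++ s.drop pos := by
  induction pos, out using pvTailA.induct s with
  | case1 pos out h ih =>
      rw [pvTailA, dif_pos h, ih, List.drop_eq_getElem_cons h,
        List.append_assoc, List.singleton_append]
  | case2 pos out h =>
      rw [pvTailA, dif_neg h]
      simp [List.drop_eq_nil_of_le (Nat.le_of_not_lt h)]

theorem pvA_loop (s : List Char) (t : List Char) :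
    ∀ (out : List Char) (pos : Nat), pos ≤ s.length →
    pvTailA s
      (t.foldl (fun (acc : List Char × Nat) c =>
        if c = '-' then (acc.1 ++ ['-'], acc.2)
        else if acc.2 < s.length then (acc.1 ++ [s.getD acc.2 ' '], acc.2 + 1)
        else (acc.1 ++ ['-'], acc.2)) (out, pos)).2
      (t.foldl (fun (acc : List Char × Nat) c =>
        if c = '-' then (acc.1 ++ ['-'], acc.2)
        else if acc.2 < s.length then (acc.1 ++ [s.getD acc.2 ' '], acc.2 + 1)
        else (acc.1 ++ ['-'], acc.2)) (out, pos)).1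
      = out ++ pvOv t (s.drop pos) := by
  induction t with
  | nil => intro out pos h; simp [pvTailA_eq, pvOv]
  | cons c t ih =>
      intro out pos h
      by_cases hc : c = '-'
      · simp only [List.foldl_cons, if_pos hc]
        rw [ih (out ++ ['-']) pos h]
        simp [pvOv, hc]
      · by_cases hp : pos < s.length
        · simp only [List.foldl_cons, if_neg hc, if_pos hp]
          rw [ih (out ++ [s.getD pos ' ']) (pos + 1) hp, List.drop_eq_getElem_cons hp]
          simp only [pvOv, if_neg hc, List.getD_eq_getElem s ' ' hp,
            List.append_assoc, List.singleton_append]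
        · simp only [List.foldl_cons, if_neg hc, if_neg hp]
          rw [ih (out ++ ['-']) pos h]
          have hd : s.drop pos = [] := List.drop_eq_nil_of_le (Nat.le_of_not_lt hp)
          simp [pvOv, hc, hd]

theorem pvOv_nil_right (t : List Char) : pvOv t [] = List.replicate t.length '-' := by
  induction t with
  | nil => simp [pvOv]
  | cons c t ih =>
      by_cases hc : c = '-' <;> simp [pvOv, hc, ih, List.replicate_succ]

theorem pvB_cons (t : List Char) (x : Char) (s' : List Char)
    (ih : ∀ ti out, pvAltLoop s' t ti out = out ++ pvOv (t.drop ti) s') :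
    ∀ (k ti : Nat) (out : List Char), t.length - ti ≤ k →
      pvAltLoop (x :: s') t ti out = out ++ pvOv (t.drop ti) (x :: s') := by
  intro k
  induction k with
  | zero =>
      intro ti out hk
      have hti : ¬ ti < t.length := by omega
      have hd : t.drop ti = [] := List.drop_eq_nil_of_le (Nat.le_of_not_lt hti)
      simp only [pvAltLoop]
      rw [pvSkipGaps, dif_neg hti]
      simp [if_neg hti, ih, hd, pvOv]
  | succ k ihk =>
      intro ti out hk
      by_cases hti : ti < t.length
      · have hd : t.drop ti = t[ti] :: t.drop (ti + 1) := List.drop_eq_getElem_cons hti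
        by_cases hg : t[ti] = '-'
        · have step : pvAltLoop (x :: s') t ti out
              = pvAltLoop (x :: s') t (ti + 1) (out ++ ['-']) := by
            simp only [pvAltLoop]
            rw [pvSkipGaps, dif_pos hti, if_pos hg]
          rw [step, ihk (ti + 1) (out ++ ['-']) (by omega), hd]
          simp [pvOv, hg]
        · simp only [pvAltLoop]
          rw [pvSkipGaps, dif_pos hti, if_neg hg]
          simp only [if_pos hti]
          rw [ih (ti + 1) (out ++ [x]), hd]
          simp [pvOv, hg]
      · have hd : t.drop ti = [] := List.drop_eq_nil_of_le (Nat.le_of_not_lt hti)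
        simp only [pvAltLoop]
        rw [pvSkipGaps, dif_neg hti]
        simp [if_neg hti, ih, hd, pvOv]

theorem pvB_loop (s : List Char) :
    ∀ (t : List Char) (ti : Nat) (out : List Char),
      pvAltLoop s t ti out = out ++ pvOv (t.drop ti) s := by
  induction s with
  | nil =>
      intro t ti out
      simp [pvAltLoop, pvOv_nil_right]
  | cons x s ih =>
      intro t ti out
      exact pvB_cons t x s (fun ti out => ih t ti out) (t.length - ti) ti out le_rfl

-- ===== VERDICT (by name: the statement is the Claim_ definition above) =====
theorem add_gaps_to_match_spec : Claim_equal_add_gaps_to_match := by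
  intro seq target _
  unfold Spec_add_gaps_to_match add_gaps_to_match add_gaps_to_match_alt
  rw [pvB_loop, List.drop_zero, List.nil_append]
  have := pvA_loop seq.toList target.toList [] 0 (Nat.zero_le _)
  simp only [List.drop_zero, List.nil_append] at this
  exact congrArg String.mk this
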